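-- pv_equiv track=rewrite | github.com/pypi-data/pypi-mirror-74 | packages/xlist/xlist-0.0.10.tar.gz/xlist-0.0.10/xlist/pair.py | find_lst_ipair_when_fstgtsnd
-- ===== SOURCE A (Python) =====
-- def find_lst_ipair_when_fstgtsnd(arr):
--     lngth = len(arr)
--     for snd in range(lngth-1,0,-1):
--         fst = snd - 1
--         if(arr[fst]>arr[snd]):
--             return((fst,snd))
--         else:
--             pass
--     return(None)
-- ===== SOURCE B (Python) =====
-- def find_lst_ipair_when_fstgtsnd(arr):
--     best = None
--     for i in range(len(arr) - 1):
--         if arr[i] > arr[i + 1]: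
--             best = i
--     return None if best is None else (best, best + 1)
-- ===== Notes on version B (the rewrite author's own statement) =====
-- stated objective: alternative
-- what changed: A scans backward from the end and early-returns the first descent it meets; B scans forward once, overwriting the best index at every descent, and returns the last one recorded.
import Mathlib
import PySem

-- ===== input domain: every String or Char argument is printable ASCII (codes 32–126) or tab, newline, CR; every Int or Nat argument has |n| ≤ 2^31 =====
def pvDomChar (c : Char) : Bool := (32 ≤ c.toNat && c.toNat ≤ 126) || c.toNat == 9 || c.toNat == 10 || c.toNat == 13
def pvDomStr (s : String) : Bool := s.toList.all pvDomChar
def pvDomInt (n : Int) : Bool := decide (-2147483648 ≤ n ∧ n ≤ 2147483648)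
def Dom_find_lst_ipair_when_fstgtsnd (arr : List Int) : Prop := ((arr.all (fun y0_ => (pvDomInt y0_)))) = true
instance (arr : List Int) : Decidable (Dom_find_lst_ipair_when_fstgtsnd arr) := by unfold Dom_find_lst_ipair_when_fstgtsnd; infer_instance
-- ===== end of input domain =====

-- B replaces A's backward early-return scan by a single forward pass that keeps the last descent index; alternative decomposition, same cost.


-- ===== PORT A =====
-- for snd in range(len-1, 0, -1): early return (snd-1, snd) on the first descent = findSome? over the countdown range.
-- indices snd-1, snd are always in range, so pyGetD with default 0 is exact here.
def find_lst_ipair_when_fstgtsnd (arr : List Int) : Option (Int × Int) :=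
  (PySem.List.pyRange ((arr.length : Int) - 1) 0 (-1)).findSome? (fun snd =>
    if PySem.List.pyGetD arr (snd - 1) 0 > PySem.List.pyGetD arr snd 0 then
      some (snd - 1, snd)
    else
      none)

-- ===== PORT B =====
-- forward pass over range(len-1), overwriting best on every descent.
def find_lst_ipair_when_fstgtsnd_alt (arr : List Int) : Option (Int × Int) :=
  let best := (PySem.List.pyRange 0 ((arr.length : Int) - 1) 1).foldl
    (fun acc i =>
      if PySem.List.pyGetD arr i 0 > PySem.List.pyGetD arr (i + 1) 0 then some i else acc)
    none
  match best with
  | none => none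
  | some b => some (b, b + 1)

-- ===== PRECONDITION & SPEC =====
def Spec_find_lst_ipair_when_fstgtsnd (arr : List Int) (out : Option (Int × Int)) : Prop := out = find_lst_ipair_when_fstgtsnd_alt arr
instance (arr : List Int) (out : Option (Int × Int)) : Decidable (Spec_find_lst_ipair_when_fstgtsnd arr out) := by unfold Spec_find_lst_ipair_when_fstgtsnd; infer_instance

-- ===== CLAIM (what is proved, stated in full; the proofs are below) =====
def Claim_equal_find_lst_ipair_when_fstgtsnd : Prop := ∀ (arr : List Int), Dom_find_lst_ipair_when_fstgtsnd arr → Spec_find_lst_ipair_when_fstgtsnd arr (find_lst_ipair_when_fstgtsnd arr)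

-- ===== LEMMAS AND PROOFS =====

-- B's overwrite-fold keeps the LAST matching element: it is the first match of the reversed list.
theorem pv_foldl_last_match (q : Int → Prop) [DecidablePred q] :
    ∀ (l : List Int) (init : Option Int),
      l.foldl (fun acc i => if q i then some i else acc) init
        = ((l.reverse.find? (fun i => decide (q i))).elim init some) := by
  intro l
  induction l with
  | nil => intro init; simp
  | cons x t ih =>
      intro init
      simp only [List.foldl_cons, ih, List.reverse_cons, List.find?_append]
      cases h : t.reverse.find? (fun i => decide (q i)) with
      | some i => simp
      | none =>
          simp only [Option.none_or, List.find?_cons, List.find?_nil]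
          by_cases hq : q x <;> simp [hq]

-- A's early-return loop is find? followed by forming the pair.
theorem pv_findSome?_if (q : Int → Prop) [DecidablePred q] (g : Int → Int × Int) :
    ∀ (l : List Int),
      l.findSome? (fun i => if q i then some (g i) else none)
        = (l.find? (fun i => decide (q i))).map g := by
  intro l
  induction l with
  | nil => simp
  | cons x t ih =>
      by_cases hq : q x <;> simp [hq, ih]

theorem find_lst_ipair_eq (arr : List Int) :
    find_lst_ipair_when_fstgtsnd arr = find_lst_ipair_when_fstgtsnd_alt arr := by
  unfold find_lst_ipair_when_fstgtsnd find_lst_ipair_when_fstgtsnd_alt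
  simp only []
  rw [pv_foldl_last_match, PySem.List.pyRange_neg_one_eq_reverse]
  have hrange : PySem.List.pyRange 1 ((arr.length : Int) - 1 + 1) 1
      = (PySem.List.pyRange 0 ((arr.length : Int) - 1) 1).map (fun x => 1 + x) := by
    rw [PySem.List.pyRange_one, PySem.List.pyRange_one]
    simp [List.map_map, Function.comp]
  have h01 : (0 : Int) + 1 = 1 := by norm_num
  rw [h01, hrange, ← List.map_reverse,
      pv_findSome?_if (fun snd => PySem.List.pyGetD arr (snd - 1) 0 > PySem.List.pyGetD arr snd 0)
        (fun snd => (snd - 1, snd))]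
  rw [List.find?_map]
  have hp : ((fun snd => decide (PySem.List.pyGetD arr (snd - 1) 0 > PySem.List.pyGetD arr snd 0)) ∘ (fun x => 1 + x))
      = (fun i => decide (PySem.List.pyGetD arr i 0 > PySem.List.pyGetD arr (i + 1) 0)) := by
    funext i
    have e2 : 1 + i = i + 1 := by ring
    have e3 : i + 1 - 1 = i := by ring
    simp only [Function.comp, e2, e3]
  rw [hp]
  cases h : (PySem.List.pyRange 0 ((arr.length : Int) - 1) 1).reverse.find?
      (fun i => decide (PySem.List.pyGetD arr i 0 > PySem.List.pyGetD arr (i + 1) 0)) with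
  | none => simp
  | some i =>
      simp only [Option.map_some, Option.elim_some]
      have e1 : 1 + i - 1 = i := by ring
      have e2 : 1 + i = i + 1 := by ring
      rw [e1, e2]

-- ===== VERDICT (by name: the statement is the Claim_ definition above) =====
theorem find_lst_ipair_when_fstgtsnd_spec : Claim_equal_find_lst_ipair_when_fstgtsnd := by
  intro arr _
  unfold Spec_find_lst_ipair_when_fstgtsnd
  exact find_lst_ipair_eq arr
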